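-- pv_equiv track=rewrite | github.com/lotemashkenazy/Git_Start | 1.9/extra3.py | new_students
-- ===== SOURCE A (Python) =====
-- def new_students(list_new_students, reformat = True):
--     if reformat == True:
--         for j in range(len(list_new_students)):
--             list_new_students[j] = list_new_students[j].title()
--             #list_new_students[j] = list_new_students[j].replace(" ", "-")
--
--             list_new_student = list(list_new_students[j])
--             counter = 0
--             for i in range(len(list_new_student)):
--                 if list_new_student[i] == " ":
--                     counter += 1
--                     if counter > 1:
--                         list_new_student[i] = "-"
--             list_new_student = ''.join(list_new_student)
--             list_new_students[j] = list_new_student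
--
--     return list_new_students
-- ===== SOURCE B (Python) =====
-- def new_students(list_new_students, reformat = True):
--     if reformat == True:
--         for j in range(len(list_new_students)):
--             parts = list_new_students[j].title().split(' ')
--             if len(parts) > 1:
--                 list_new_students[j] = parts[0] + ' ' + '-'.join(parts[1:])
--             else:
--                 list_new_students[j] = parts[0]
--     return list_new_students
-- ===== Notes on version B (the rewrite author's own statement) =====
-- stated objective: simpler
-- what changed: Replaces A's character-by-character loop with a running space counter by a word-level split on ' ' that keeps the first part, then rejoins the remaining parts with '-'.
import Mathlib
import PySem

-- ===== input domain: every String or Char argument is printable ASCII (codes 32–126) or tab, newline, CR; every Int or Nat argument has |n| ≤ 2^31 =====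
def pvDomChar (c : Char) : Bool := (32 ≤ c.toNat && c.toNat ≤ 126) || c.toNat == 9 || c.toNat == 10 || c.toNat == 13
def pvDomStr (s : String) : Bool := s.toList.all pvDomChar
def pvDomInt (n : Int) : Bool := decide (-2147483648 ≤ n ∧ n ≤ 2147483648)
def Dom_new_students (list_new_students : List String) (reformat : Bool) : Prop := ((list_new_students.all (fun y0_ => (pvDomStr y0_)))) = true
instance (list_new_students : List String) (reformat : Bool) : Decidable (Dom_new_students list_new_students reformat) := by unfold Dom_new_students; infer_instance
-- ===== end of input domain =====

-- B replaces A's character-by-character space-counting loop with a word-level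
-- split/rejoin (simpler decomposition). A mutates the list in place; the
-- equivalence proved here is about the return value only.

-- ===== PORT A =====
-- shared helper: str.title() (exact on ASCII; both Pythons call it), hand-ported:
-- uppercase an alpha char after a non-alpha, lowercase an alpha char after an alpha
def pvTitleGo (prev : Bool) : List Char → List Char
  | [] => []
  | c :: rest =>
    if PySem.Chars.isalpha c then
      (if prev then PySem.Chars.lowerChar c else PySem.Chars.upperChar c) :: pvTitleGo true rest
    else c :: pvTitleGo false rest

def pvTitle (cs : List Char) : List Char := pvTitleGo false cs

-- A's inner index loop over the char list, carrying the running space counter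
def pvDashLoop : List Char → Nat → List Char
  | [], _ => []
  | c :: rest, counter =>
    if c == ' ' then
      (if counter + 1 > 1 then '-' else c) :: pvDashLoop rest (counter + 1)
    else c :: pvDashLoop rest counter

def new_students (list_new_students : List String) (reformat : Bool) : List String :=
  if reformat then
    list_new_students.map (fun s => String.ofList (pvDashLoop (pvTitle s.toList) 0))
  else list_new_students

-- ===== PORT B =====
-- B: parts = title(s).split(' '); if len(parts) > 1 then parts[0] + ' ' + '-'.join(parts[1:]) else parts[0]
def new_students_alt (list_new_students : List String) (reformat : Bool) : List String :=
  if reformat then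
    list_new_students.map (fun s =>
      match (pvTitle s.toList).splitOn ' ' with
      | [] => ""   -- unreachable: split(' ') is never empty
      | p :: rest =>
        if rest.length > 0 then String.ofList (p ++ ' ' :: List.intercalate ['-'] rest)
        else String.ofList p)
  else list_new_students

-- ===== PRECONDITION & SPEC =====
def Spec_new_students (list_new_students : List String) (reformat : Bool) (out : List String) : Prop := out = new_students_alt list_new_students reformat
instance (list_new_students : List String) (reformat : Bool) (out : List String) : Decidable (Spec_new_students list_new_students reformat out) := by unfold Spec_new_students; infer_instance

-- ===== CLAIM (what is proved, stated in full; the proofs are below) =====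
def Claim_equal_new_students : Prop := ∀ (list_new_students : List String) (reformat : Bool), Dom_new_students list_new_students reformat → Spec_new_students list_new_students reformat (new_students list_new_students reformat)

-- ===== LEMMAS AND PROOFS =====

-- once the counter is positive, every remaining space becomes a dash
lemma pvDashLoop_pos (cs : List Char) (n : Nat) :
    pvDashLoop cs (n + 1) = cs.map (fun c => if c == ' ' then '-' else c) := by
  induction cs generalizing n with
  | nil => rfl
  | cons c rest ih =>
    by_cases h : c = ' ' <;> simp [pvDashLoop, h, ih]

lemma splitOn_ne_nil (cs : List Char) : cs.splitOn ' ' ≠ [] := by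
  simp [List.splitOn]
  exact List.splitOnP_ne_nil _ _

lemma intercalate_singleton (p : List Char) : List.intercalate ['-'] [p] = p := by
  simp [List.intercalate]

lemma intercalate_cons2 (x p : List Char) (t : List (List Char)) :
    List.intercalate ['-'] (x :: p :: t) = x ++ '-' :: List.intercalate ['-'] (p :: t) := by
  simp [List.intercalate, List.intersperse]

lemma splitOn_cons (c : Char) (rest : List Char) :
    (c :: rest).splitOn ' ' =
      if c = ' ' then [] :: rest.splitOn ' '
      else (rest.splitOn ' ').modifyHead (c :: ·) := by
  by_cases h : c = ' ' <;> simp [List.splitOn, List.splitOnP_cons, h]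

-- dashing every space equals joining the split parts with '-'
lemma intercalate_splitOn (cs : List Char) :
    List.intercalate ['-'] (cs.splitOn ' ') = cs.map (fun c => if c == ' ' then '-' else c) := by
  induction cs with
  | nil => simp [List.splitOn_nil, intercalate_singleton]
  | cons c rest ih =>
    obtain ⟨p, t, hpt⟩ := List.exists_cons_of_ne_nil (splitOn_ne_nil rest)
    rw [splitOn_cons, hpt]
    rw [hpt] at ih
    by_cases h : c = ' '
    · rw [if_pos h, intercalate_cons2, ih]
      simp [h]
    · rw [if_neg h]
      cases t with
      | nil =>
        rw [intercalate_singleton] at ih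
        simp [intercalate_singleton, h, ih]
      | cons q u =>
        rw [intercalate_cons2] at ih
        rw [List.modifyHead_cons, intercalate_cons2]
        simp [h]
        simpa using ih

-- per-string core: A's counter loop from 0 equals B's split/rejoin
lemma dash_eq_split (cs : List Char) :
    pvDashLoop cs 0 =
      match cs.splitOn ' ' with
      | [] => []
      | p :: rest =>
        if rest.length > 0 then p ++ ' ' :: List.intercalate ['-'] rest else p := by
  induction cs with
  | nil => rfl
  | cons c rest ih =>
    obtain ⟨p, t, hpt⟩ := List.exists_cons_of_ne_nil (splitOn_ne_nil rest)
    rw [splitOn_cons]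
    by_cases h : c = ' '
    · have h1 : pvDashLoop (c :: rest) 0 = ' ' :: List.map (fun c => if c == ' ' then '-' else c) rest := by
        simp [pvDashLoop, h, pvDashLoop_pos rest 0]
      rw [h1, if_pos h, ← intercalate_splitOn rest, hpt]
      simp
    · have h1 : pvDashLoop (c :: rest) 0 = c :: pvDashLoop rest 0 := by
        simp [pvDashLoop, h]
      rw [h1, ih, if_neg h, hpt]
      cases t <;> simp

-- ===== VERDICT (by name: the statement is the Claim_ definition above) =====
theorem new_students_spec : Claim_equal_new_students := by
  intro l reformat _
  unfold Spec_new_students new_students new_students_alt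
  cases reformat with
  | false => simp
  | true =>
    apply List.map_congr_left
    intro s _
    rw [dash_eq_split]
    obtain ⟨p, t, hpt⟩ := List.exists_cons_of_ne_nil (splitOn_ne_nil (pvTitle s.toList))
    rw [hpt]
    cases t <;> simp
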